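-- pv_equiv track=rewrite | github.com/parklab/mutagenesis_tools | make_all_nmer_substitutions_revised_fix.py | get_new_substitutions
-- ===== SOURCE A (Python) =====
-- import itertools
--
-- def get_new_substitutions (inseq,make_deletions=False):
--
-- 	bases = ['a','c','g','t']
-- 	if make_deletions:
-- 		bases += '-'
-- 	inds_bases = range(len(bases))
-- 	kmers = []
--
-- 	#for i in itertools.combinations_with_replacement(bases, len(inseq)):
-- 	for i in itertools.product(inds_bases, repeat = len(inseq)):
-- 		combination = [bases[k] for k in i]
-- 		kmers.append(''.join(combination))
--
-- 	substitutions = list(set(kmers) - set([inseq.lower()]))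
-- 	return(substitutions)
-- ===== SOURCE B (Python) =====
-- def get_new_substitutions(inseq, make_deletions=False):
--     bases = 'acgt' + ('-' if make_deletions else '')
--     b = len(bases)
--     n = len(inseq)
--
--     def unrank(code, length):
--         # decode the rank `code` (base-b numeral) into its n-mer, most significant digit first
--         if length == 0:
--             return ''
--         return unrank(code // b, length - 1) + bases[code % b]
--
--     kmers = [unrank(code, n) for code in range(b ** n)]
--     return list(set(kmers) - {inseq.lower()})
-- ===== Notes on version B (the rewrite author's own statement) =====
-- stated objective: alternative
-- what changed: Replaces the itertools.product enumeration of index tuples by base-b numeric unranking: each k-mer is decoded from its rank in range(b**n) by repeated divmod, so no cartesian-product structure is built at all.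
import Mathlib
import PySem

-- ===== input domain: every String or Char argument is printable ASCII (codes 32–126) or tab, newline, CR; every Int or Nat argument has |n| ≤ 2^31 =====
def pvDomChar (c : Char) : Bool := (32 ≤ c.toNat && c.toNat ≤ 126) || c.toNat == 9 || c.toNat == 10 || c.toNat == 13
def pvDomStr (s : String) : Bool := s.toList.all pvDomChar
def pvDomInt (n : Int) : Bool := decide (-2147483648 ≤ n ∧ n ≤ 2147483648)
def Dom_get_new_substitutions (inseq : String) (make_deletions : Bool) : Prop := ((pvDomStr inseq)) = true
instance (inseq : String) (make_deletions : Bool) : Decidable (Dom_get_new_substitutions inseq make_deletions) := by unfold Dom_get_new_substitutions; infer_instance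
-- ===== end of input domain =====

-- B replaces the itertools.product enumeration by base-b unranking: each k-mer is decoded
-- from its numeric rank by repeated divmod; same cost class, a different algorithm.

-- ===== PORT A =====
-- itertools.product(range m, repeat n), in product's lexicographic order (first coordinate
-- varies slowest); PySem has no `product`, so it is ported by hand, exact on this use.
def pvProdIdx (m : Nat) : Nat → List (List Nat)
  | 0 => [[]]
  | n + 1 => (List.range m).flatMap (fun k => (pvProdIdx m n).map (fun rest => k :: rest))

def get_new_substitutions (inseq : String) (make_deletions : Bool) : List String :=
  let bases : List Char := ['a', 'c', 'g', 't'] ++ (if make_deletions then ['-'] else [])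
  -- combination = [bases[k] for k in i]; ''.join(combination) = that char list as a string
  let kmers : List (List Char) :=
    (pvProdIdx bases.length inseq.toList.length).map
      (fun i => i.map (fun k => bases.getD k 'a'))
  (PySem.Set.diff (PySem.Set.ofList kmers) [PySem.Chars.lower inseq.toList]).map String.mk

-- ===== PORT B =====
-- unrank(code, length): base-b decoding by repeated divmod, most significant digit last;
-- exact: code stays a Python int (ported as Int with PySem floor divmod), index code % b < b.
def pvUnrank (bases : List Char) : Int → Nat → List Char
  | _, 0 => []
  | code, n + 1 =>
      pvUnrank bases (PySem.Int.floordiv code bases.length) n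
        ++ [bases.getD (PySem.Int.mod code bases.length).toNat 'a']

def get_new_substitutions_alt (inseq : String) (make_deletions : Bool) : List String :=
  let bases : List Char := ['a', 'c', 'g', 't'] ++ (if make_deletions then ['-'] else [])
  -- range(b ** n): b, n are non-negative, so the Nat power cast is exact
  let kmers : List (List Char) :=
    (PySem.List.pyRange 0 ((bases.length ^ inseq.toList.length : Nat) : Int) 1).map
      (fun code => pvUnrank bases code inseq.toList.length)
  (PySem.Set.diff (PySem.Set.ofList kmers) [PySem.Chars.lower inseq.toList]).map String.mk

-- ===== PRECONDITION & SPEC =====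
def Spec_get_new_substitutions (inseq : String) (make_deletions : Bool) (out : List String) : Prop := out = get_new_substitutions_alt inseq make_deletions
instance (inseq : String) (make_deletions : Bool) (out : List String) : Decidable (Spec_get_new_substitutions inseq make_deletions out) := by unfold Spec_get_new_substitutions; infer_instance

-- ===== CLAIM (what is proved, stated in full; the proofs are below) =====
def Claim_equal_get_new_substitutions : Prop := ∀ (inseq : String) (make_deletions : Bool), Dom_get_new_substitutions inseq make_deletions → Spec_get_new_substitutions inseq make_deletions (get_new_substitutions inseq make_deletions)

-- ===== LEMMAS AND PROOFS =====

-- all words of length n over `bases`, head form (A's shape after replacing indices by chars)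
def pvWords (bases : List Char) : Nat → List (List Char)
  | 0 => [[]]
  | n + 1 => bases.flatMap (fun b => (pvWords bases n).map (fun rest => b :: rest))

lemma pvRangeGetD (bases : List Char) :
    (List.range bases.length).map (fun k => bases.getD k 'a') = bases := by
  apply List.ext_getElem
  · simp
  · intro i h1 h2
    simp [List.getD_eq_getElem?_getD, List.getElem?_eq_getElem (by simpa using h2)]

lemma pvProdIdx_map (bases : List Char) (n : Nat) :
    (pvProdIdx bases.length n).map (fun i => i.map (fun k => bases.getD k 'a'))
      = pvWords bases n := by
  induction n with
  | zero => simp [pvProdIdx, pvWords]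
  | succ n ih =>
    have key : ∀ (g : Char → List (List Char)),
        (List.range bases.length).flatMap (fun k => g (bases.getD k 'a')) = bases.flatMap g := by
      intro g
      conv_rhs => rw [← pvRangeGetD bases]
      rw [List.flatMap_map]
    simp only [pvProdIdx, pvWords, List.map_flatMap, List.map_map]
    rw [← ih]
    simp only [List.map_map, Function.comp_def]
    exact key (fun b => (pvProdIdx bases.length n).map
      (fun rest => b :: rest.map (fun k => bases.getD k 'a')))

-- words of length n+1 are words of length n each extended by one char (snoc form)
lemma pvWords_snoc (bases : List Char) (n : Nat) :
    pvWords bases (n + 1)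
      = (pvWords bases n).flatMap (fun p => bases.map (fun b => p ++ [b])) := by
  induction n with
  | zero => simp [pvWords, ← List.map_eq_flatMap]
  | succ n ih =>
    conv_lhs => rw [pvWords, ih]
    conv_rhs => rw [pvWords]
    simp only [List.map_flatMap, List.flatMap_assoc, List.flatMap_map, List.map_map,
      Function.comp_def, List.cons_append]

lemma pvRange_mul_flatMap (m k : Nat) :
    List.range (m * k)
      = (List.range m).flatMap (fun i => (List.range k).map (fun j => i * k + j)) := by
  induction m with
  | zero => simp
  | succ m ih =>
    rw [Nat.succ_mul, List.range_add, ih, List.range_succ]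
    simp

lemma pvUnrank_step (bases : List Char) (i j n : Nat) (hj : j < bases.length) :
    pvUnrank bases ((i * bases.length + j : Nat) : Int) (n + 1)
      = pvUnrank bases (i : Nat) n ++ [bases.getD j 'a'] := by
  have hb : 0 < bases.length := Nat.pos_of_ne_zero (by rintro h; simp [h] at hj)
  have hdiv : (i * bases.length + j) / bases.length = i := by
    rw [Nat.mul_comm i, Nat.mul_add_div hb, Nat.div_eq_of_lt hj, Nat.add_zero]
  have hmod : (i * bases.length + j) % bases.length = j := by
    rw [Nat.mul_comm i, Nat.mul_add_mod, Nat.mod_eq_of_lt hj]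
  simp only [pvUnrank, PySem.Int.floordiv_natCast, PySem.Int.mod_natCast, hdiv, hmod,
    Int.toNat_natCast]

lemma pvUnrank_words (bases : List Char) (n : Nat) :
    (List.range (bases.length ^ n)).map (fun k => pvUnrank bases (k : Nat) n)
      = pvWords bases n := by
  induction n with
  | zero => simp [pvUnrank, pvWords]
  | succ n ih =>
    rw [pow_succ, pvRange_mul_flatMap, List.map_flatMap, pvWords_snoc, ← ih,
      List.flatMap_map]
    have hsnoc : ∀ w : List Char, bases.map (fun b => w ++ [b])
        = (List.range bases.length).map (fun j => w ++ [bases.getD j 'a']) := by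
      intro w
      conv_lhs => rw [← pvRangeGetD bases]
      rw [List.map_map]
      rfl
    have inner : ∀ i : Nat,
        ((List.range bases.length).map (fun j => i * bases.length + j)).map
            (fun k => pvUnrank bases (k : Nat) (n + 1))
          = bases.map (fun b => pvUnrank bases (i : Nat) n ++ [b]) := by
      intro i
      rw [hsnoc, List.map_map]
      apply List.map_congr_left
      intro j hj
      exact pvUnrank_step bases i j n (List.mem_range.mp hj)
    exact List.flatMap_congr (fun i _ => inner i)

-- ===== VERDICT (by name: the statement is the Claim_ definition above) =====
theorem get_new_substitutions_spec : Claim_equal_get_new_substitutions := by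
  intro inseq make_deletions _
  show _ = _
  unfold get_new_substitutions get_new_substitutions_alt
  simp only [PySem.List.pyRange_zero_natCast]
  rw [pvProdIdx_map, List.map_map]
  rw [show ((fun code => pvUnrank (['a','c','g','t'] ++ (if make_deletions then ['-'] else []))
      code inseq.toList.length) ∘ (fun k : Nat => (k : Int)))
    = (fun k : Nat => pvUnrank (['a','c','g','t'] ++ (if make_deletions then ['-'] else []))
      (k : Nat) inseq.toList.length) from rfl]
  rw [pvUnrank_words]
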